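-- pv_equiv track=rewrite | github.com/grebennikoovaa/prg-basics | 13-Test3/p7.py | f
-- ===== SOURCE A (Python) =====
-- def f(d):
--     list = set()
--     for car, action in d:
--         if action == "in":
--             list.add(car)
--         elif action == "out":
--             list.discard(car)
--     return sorted(list)
-- ===== SOURCE B (Python) =====
-- def f(d):
--     # Scan the log back-to-front: the FIRST relevant event seen for a car (its most
--     # recent one) decides its presence once and for all; later (earlier-in-time)
--     # events for that car are skipped.
--     seen = set()
--     present = []
--     for car, action in reversed(d):
--         if action in ("in", "out") and car not in seen:
--             seen.add(car)
--             if action == "in":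
--                 present.append(car)
--     return sorted(present)
-- ===== Notes on version B (the rewrite author's own statement) =====
-- stated objective: alternative
-- what changed: Instead of replaying all events forward against a mutating presence set, B scans the log once in reverse and decides each car at its first (i.e. most recent) relevant event, skipping all earlier events for already-decided cars.
import Mathlib
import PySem

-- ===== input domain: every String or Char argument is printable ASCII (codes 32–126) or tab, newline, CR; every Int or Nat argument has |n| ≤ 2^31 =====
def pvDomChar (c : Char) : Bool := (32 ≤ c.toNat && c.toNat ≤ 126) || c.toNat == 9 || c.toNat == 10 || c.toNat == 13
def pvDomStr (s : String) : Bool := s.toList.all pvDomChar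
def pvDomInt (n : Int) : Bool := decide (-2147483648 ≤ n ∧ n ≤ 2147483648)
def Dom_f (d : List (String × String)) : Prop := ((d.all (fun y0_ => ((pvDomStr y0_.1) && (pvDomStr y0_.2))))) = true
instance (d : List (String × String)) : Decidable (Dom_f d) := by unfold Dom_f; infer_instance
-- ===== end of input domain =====

-- B replaces A's forward replay of every event against a mutating presence set by a single
-- reverse scan that decides each car at its most recent relevant event: an alternative
-- decomposition, same cost.

-- ===== PORT A =====
-- literal transliteration of A: replay all events forward against a set, then sort it
def f (d : List (String × String)) : List String :=
  let s : PySem.Set String :=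
    d.foldl (fun s p =>
      if p.2 == "in" then PySem.Set.add s p.1
      else if p.2 == "out" then PySem.Set.discard s p.1
      else s) PySem.Set.empty
  PySem.List.sorted s (fun x => x) false

-- ===== PORT B =====
-- literal transliteration of B: reverse scan, first relevant event per car decides it
def f_alt (d : List (String × String)) : List String :=
  let st :=
    d.reverse.foldl (fun (st : PySem.Set String × List String) p =>
      if (p.2 == "in" || p.2 == "out") && !(PySem.Set.contains st.1 p.1) then
        (PySem.Set.add st.1 p.1, if p.2 == "in" then st.2 ++ [p.1] else st.2)
      else st) (PySem.Set.empty, [])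
  PySem.List.sorted st.2 (fun x => x) false

-- ===== PRECONDITION & SPEC =====
def Spec_f (d : List (String × String)) (out : List String) : Prop := out = f_alt d
instance (d : List (String × String)) (out : List String) : Decidable (Spec_f d out) := by unfold Spec_f; infer_instance

-- ===== CLAIM (what is proved, stated in full; the proofs are below) =====
def Claim_equal_f : Prop := ∀ (d : List (String × String)), Dom_f d → Spec_f d (f d)

-- ===== LEMMAS AND PROOFS =====

-- the "relevant event for car x" predicate both characterisations use
def pvQ (x : String) (p : String × String) : Bool :=
  p.1 == x && (p.2 == "in" || p.2 == "out")

-- A's set: membership is decided by the LAST relevant event in d (first in d.reverse)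
theorem pv_memA (d : List (String × String)) (s : PySem.Set String) (x : String) :
    (x ∈ d.foldl (fun s p =>
        if p.2 == "in" then PySem.Set.add s p.1
        else if p.2 == "out" then PySem.Set.discard s p.1
        else s) s)
      ↔ (d.reverse.find? (pvQ x)).elim (x ∈ s) (fun r => r.2 = "in") := by
  induction d generalizing s with
  | nil => simp
  | cons p t ih =>
    simp only [List.foldl_cons, List.reverse_cons, List.find?_append]
    rw [ih]
    rcases h : t.reverse.find? (pvQ x) with _ | r
    · simp only [Option.none_or, Option.elim]
      by_cases hq : pvQ x p = true
      · rw [List.find?_cons_of_pos hq]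
        have hx : p.1 = x := by
          have := hq; unfold pvQ at this; exact eq_of_beq (Bool.and_elim_left this)
        have hrel : (p.2 == "in" || p.2 == "out") = true := by
          have := hq; unfold pvQ at this; exact Bool.and_elim_right this
        subst hx
        by_cases hin : (p.2 == "in") = true
        · simp [PySem.Set.mem_add, eq_of_beq hin]
        · have hout : (p.2 == "out") = true := by
            rcases Bool.or_eq_true_iff.mp hrel with h' | h'
            · exact absurd h' hin
            · exact h'
          simp [PySem.Set.mem_discard, eq_of_beq hout]
      · rw [List.find?_cons_of_neg hq]
        have hx : (p.1 == x) = false ∨ (p.2 == "in" || p.2 == "out") = false := by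
          unfold pvQ at hq
          by_cases h1 : (p.1 == x) = true
          · right
            by_cases h2 : (p.2 == "in" || p.2 == "out") = true
            · exact absurd (by unfold pvQ; rw [h1, h2]; rfl : pvQ x p = true) hq
            · exact Bool.eq_false_iff.mpr h2
          · exact Or.inl (Bool.eq_false_iff.mpr h1)
        rcases hx with hx | hx
        · have hne : x ≠ p.1 := fun he => by simp [he] at hx
          by_cases hin : (p.2 == "in") = true
          · simp [hin, PySem.Set.mem_add, hne]
          · by_cases hout : (p.2 == "out") = true
            · simp [hin, hout, PySem.Set.mem_discard, hne]
            · simp [hin, hout]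
        · have hin : (p.2 == "in") = false := by
            rcases Bool.or_eq_false_iff.mp hx with ⟨h1, _⟩; exact h1
          have hout : (p.2 == "out") = false := by
            rcases Bool.or_eq_false_iff.mp hx with ⟨_, h2⟩; exact h2
          simp [hin, hout]
    · simp only [Option.some_or, Option.elim]

-- A's fold preserves Nodup
theorem pv_nodupA (d : List (String × String)) (s : PySem.Set String) (hs : s.Nodup) :
    (d.foldl (fun s p =>
        if p.2 == "in" then PySem.Set.add s p.1
        else if p.2 == "out" then PySem.Set.discard s p.1
        else s) s).Nodup := by
  induction d generalizing s with
  | nil => exact hs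
  | cons p t ih =>
    simp only [List.foldl_cons]
    by_cases hin : (p.2 == "in") = true
    · simp only [hin, if_pos]
      exact ih _ (PySem.Set.nodup_add _ _ hs)
    · by_cases hout : (p.2 == "out") = true
      · simp only [hin, hout, if_pos, if_neg, Bool.false_eq_true, not_false_eq_true]
        exact ih _ (PySem.Set.nodup_discard _ _ hs)
      · simp only [hin, hout, if_neg, Bool.false_eq_true, not_false_eq_true]
        exact ih _ hs

-- B's fold: the accumulated list contains x iff x's first relevant event in l is "in"
theorem pv_invB (l : List (String × String)) (sn : PySem.Set String) (pr : List String)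
    (hsub : ∀ y ∈ pr, y ∈ sn) (hnd : pr.Nodup) :
    let st := l.foldl (fun (st : PySem.Set String × List String) p =>
      if (p.2 == "in" || p.2 == "out") && !(PySem.Set.contains st.1 p.1) then
        (PySem.Set.add st.1 p.1, if p.2 == "in" then st.2 ++ [p.1] else st.2)
      else st) (sn, pr)
    (∀ x, x ∈ st.2 ↔ x ∈ pr ∨ (x ∉ sn ∧ (l.find? (pvQ x)).elim False (fun r => r.2 = "in")))
      ∧ st.2.Nodup := by
  induction l generalizing sn pr with
  | nil => exact ⟨fun x => by simp, hnd⟩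
  | cons p t ih =>
    simp only [List.foldl_cons]
    by_cases hrel : (p.2 == "in" || p.2 == "out") = true
    · by_cases hseen : PySem.Set.contains sn p.1 = true
      · simp only [hrel, hseen, Bool.not_true, Bool.and_false, Bool.false_eq_true,
          if_neg, not_false_eq_true]
        obtain ⟨hm, hn⟩ := ih sn pr hsub hnd
        refine ⟨fun x => ?_, hn⟩
        rw [hm x]
        by_cases hq : pvQ x p = true
        · have hx : p.1 = x := eq_of_beq (Bool.and_elim_left (by unfold pvQ at hq; exact hq))
          have hxs : x ∈ sn := hx ▸ (PySem.Set.contains_iff sn p.1).mp hseen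
          rw [List.find?_cons_of_pos hq]
          simp [hxs]
        · rw [List.find?_cons_of_neg hq]
      · simp only [hrel, hseen, Bool.not_false, Bool.and_true, if_pos]
        have hps : p.1 ∉ sn := fun h => hseen ((PySem.Set.contains_iff sn p.1).mpr h)
        have hpr : p.1 ∉ pr := fun h => hps (hsub _ h)
        have hsub' : ∀ y ∈ (if (p.2 == "in") = true then pr ++ [p.1] else pr),
            y ∈ PySem.Set.add sn p.1 := by
          intro y hy
          rw [PySem.Set.mem_add]
          split at hy
          · rcases List.mem_append.mp hy with h | h
            · exact Or.inl (hsub _ h)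
            · exact Or.inr (List.mem_singleton.mp h)
          · exact Or.inl (hsub _ hy)
        have hnd' : (if (p.2 == "in") = true then pr ++ [p.1] else pr).Nodup := by
          split
          · simp [List.nodup_append, hnd]
            intro a ha he
            exact hpr (he ▸ ha)
          · exact hnd
        obtain ⟨hm, hn⟩ := ih _ _ hsub' hnd'
        refine ⟨fun x => ?_, hn⟩
        rw [hm x]
        by_cases hx : p.1 = x
        · subst hx
          have hq : pvQ p.1 p = true := by unfold pvQ; simp [hrel]
          rw [List.find?_cons_of_pos hq]
          have h1 : p.1 ∈ PySem.Set.add sn p.1 := (PySem.Set.mem_add _ _ _).mpr (Or.inr rfl)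
          by_cases hin : (p.2 == "in") = true
          · simp [hps, eq_of_beq hin]
          · have hout : (p.2 == "out") = true := by
              rcases Bool.or_eq_true_iff.mp hrel with h' | h'
              · exact absurd h' hin
              · exact h'
            have : p.2 = "out" := eq_of_beq hout
            simp [hps, this]
        · have hq : ¬ pvQ x p = true := by
            unfold pvQ
            simp only [Bool.and_eq_true, beq_iff_eq]
            rintro ⟨h1, _⟩; exact hx h1
          rw [List.find?_cons_of_neg hq]
          have h1 : x ∈ PySem.Set.add sn p.1 ↔ x ∈ sn := by
            rw [PySem.Set.mem_add]
            simp [Ne.symm hx]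
          have h2 : (x ∈ if (p.2 == "in") = true then pr ++ [p.1] else pr) ↔ x ∈ pr := by
            split
            · simp [Ne.symm hx]
            · rfl
          rw [h1, h2]
    · simp only [hrel, Bool.false_and, Bool.false_eq_true, if_neg, not_false_eq_true]
      obtain ⟨hm, hn⟩ := ih sn pr hsub hnd
      refine ⟨fun x => ?_, hn⟩
      rw [hm x]
      have hq : ¬ pvQ x p = true := by
        unfold pvQ
        simp only [Bool.and_eq_true]
        rintro ⟨_, h2⟩; exact hrel h2
      rw [List.find?_cons_of_neg hq]

-- ===== VERDICT (by name: the statement is the Claim_ definition above) =====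
theorem f_spec : Claim_equal_f := by
  intro d _
  unfold Spec_f f f_alt
  obtain ⟨hmem, hnd⟩ := pv_invB d.reverse PySem.Set.empty [] (by simp) List.nodup_nil
  apply PySem.List.sorted_eq_sorted_of_perm _ _ _ (fun a b h => h)
  rw [List.perm_ext_iff_of_nodup (pv_nodupA d PySem.Set.empty List.nodup_nil) hnd]
  intro x
  rw [pv_memA, hmem x]
  simp [PySem.Set.empty]
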